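-- pv_equiv track=rewrite | github.com/AndrewMathias/Toggl_Processing | src/SunburstMaker.py | colorsListSunburst
-- ===== SOURCE A (Python) =====
-- def colorsListSunburst(sunColorDict, justNameLabels):
--     myColorList = []
--     myColorList.append("")
--     for label in justNameLabels:
--         if label in sunColorDict:
--             myColorList.append(sunColorDict[label])
--         elif label == "Discouraged":
--             myColorList.append("rgb(150, 20, 0)")
--         elif label == "Encouraged":
--             myColorList.append("rgb(0, 200, 140)")
--         else:
--             myColorList.append("")
--     return myColorList
-- ===== SOURCE B (Python) =====
-- def colorsListSunburst(sunColorDict, justNameLabels):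
--     # Scatter/inverted approach: pre-size the output (leading "" + one "" per label),
--     # build an index label -> list of output positions, then iterate over the color
--     # table (two special labels, overridden by sunColorDict) and scatter each color
--     # into all positions of its label; unmatched labels just keep their "".
--     result = [""] * (len(justNameLabels) + 1)
--     positions = {}
--     for i, label in enumerate(justNameLabels):
--         positions.setdefault(label, []).append(i + 1)
--     table = {"Discouraged": "rgb(150, 20, 0)", "Encouraged": "rgb(0, 200, 140)"}
--     table.update(sunColorDict)
--     for key, color in table.items():
--         for i in positions.get(key, []):
--             result[i] = color
--     return result
-- ===== Notes on version B (the rewrite author's own statement) =====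
-- stated objective: alternative
-- what changed: Replaces A's single forward pass that classifies each label with a three-way branch and appends, by an inverted scatter algorithm: pre-size the output with empty strings, build an index from label to output positions, then loop over the color table (two special labels overridden by sunColorDict) writing each color into all positions of its label; unmatched labels simply keep the pre-filled "".
import Mathlib
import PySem

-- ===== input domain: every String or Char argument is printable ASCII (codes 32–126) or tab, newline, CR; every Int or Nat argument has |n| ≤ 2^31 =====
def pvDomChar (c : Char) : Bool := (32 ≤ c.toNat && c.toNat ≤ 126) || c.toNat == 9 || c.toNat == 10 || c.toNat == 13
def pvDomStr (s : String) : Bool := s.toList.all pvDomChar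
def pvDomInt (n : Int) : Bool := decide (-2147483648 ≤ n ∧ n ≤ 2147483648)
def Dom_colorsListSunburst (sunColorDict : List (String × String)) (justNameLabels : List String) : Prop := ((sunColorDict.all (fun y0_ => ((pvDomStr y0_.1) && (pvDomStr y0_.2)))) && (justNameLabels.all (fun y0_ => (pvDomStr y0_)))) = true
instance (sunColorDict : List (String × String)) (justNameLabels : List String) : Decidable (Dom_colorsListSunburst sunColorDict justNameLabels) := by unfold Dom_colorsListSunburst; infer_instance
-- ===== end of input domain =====

-- B replaces A's one-pass branch-per-label accumulation by an inverted "scatter" algorithm: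
-- pre-size the output, index label -> output positions, then loop over the COLOR TABLE and
-- write each color into all positions of its label (alternative decomposition, same cost).

-- ===== PORT A =====
-- A receives sunColorDict as a Python dict; the association list is turned into the dict once
-- (PySem.Dict.ofList matches Python's dict(pairs): later duplicates win), then each label is
-- classified by the original if/elif chain, appending to the accumulator list.
def colorsListSunburst (sunColorDict : List (String × String)) (justNameLabels : List String) : List String :=
  let d := PySem.Dict.ofList sunColorDict
  justNameLabels.foldl
    (fun myColorList label =>
      if d.contains label then myColorList ++ [d.getD label ""]
      else if label = "Discouraged" then myColorList ++ ["rgb(150, 20, 0)"]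
      else if label = "Encouraged" then myColorList ++ ["rgb(0, 200, 140)"]
      else myColorList ++ [""])
    [""]

-- ===== PORT B =====
-- result = [""] * (n+1); positions: label -> list of output indices, built with
-- setdefault(label, []).append(i+1) = Dict.modify label [] (· ++ [i+1]); table = the two
-- special entries then .update(sunColorDict); finally scatter each (key, color) of the
-- table into result at positions.get(key, []) (result[i] = color is pySetD).
def colorsListSunburst_alt (sunColorDict : List (String × String)) (justNameLabels : List String) : List String :=
  let result := List.replicate (justNameLabels.length + 1) ""
  let positions := (PySem.List.enumerate justNameLabels).foldl
      (fun d p => d.modify p.2 [] (· ++ [p.1 + 1])) PySem.Dict.empty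
  let table := ((PySem.Dict.empty.insert "Discouraged" "rgb(150, 20, 0)").insert
      "Encouraged" "rgb(0, 200, 140)").update sunColorDict
  table.items.foldl
    (fun res kc => (positions.getD kc.1 []).foldl (fun r i => PySem.List.pySetD r i kc.2) res)
    result

-- ===== PRECONDITION & SPEC =====
def Spec_colorsListSunburst (sunColorDict : List (String × String)) (justNameLabels : List String) (out : List String) : Prop := out = colorsListSunburst_alt sunColorDict justNameLabels
instance (sunColorDict : List (String × String)) (justNameLabels : List String) (out : List String) : Decidable (Spec_colorsListSunburst sunColorDict justNameLabels out) := by unfold Spec_colorsListSunburst; infer_instance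

-- ===== CLAIM (what is proved, stated in full; the proofs are below) =====
def Claim_equal_colorsListSunburst : Prop := ∀ (sunColorDict : List (String × String)) (justNameLabels : List String), Dom_colorsListSunburst sunColorDict justNameLabels → Spec_colorsListSunburst sunColorDict justNameLabels (colorsListSunburst sunColorDict justNameLabels)

-- ===== LEMMAS AND PROOFS =====

-- Lookup in a dict updated with an association list: the list's (last-wins) binding if present,
-- otherwise the base dict's binding.
theorem get?_update_eq {ν : Type} (l : List (String × ν)) (b : PySem.Dict String ν) (k : String) :
    (b.update l).get? k =
      match (PySem.Dict.ofList l).get? k with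
      | some v => some v
      | none   => b.get? k := by
  induction l generalizing b with
  | nil => simp [PySem.Dict.update, PySem.Dict.ofList, PySem.Dict.get?_empty]
  | cons p t ih =>
      have hstep : ∀ (b' : PySem.Dict String ν), b'.update (p :: t) = (b'.insert p.1 p.2).update t := by
        intro b'; simp [PySem.Dict.update]
      have hof : PySem.Dict.ofList (p :: t) = (PySem.Dict.empty.insert p.1 p.2).update t := by
        simp [PySem.Dict.ofList, PySem.Dict.update]
      rw [hstep b, ih, hof, ih]
      rcases h : (PySem.Dict.ofList t).get? k with _ | v
      · simp [PySem.Dict.get?_insert]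
        split_ifs with hk
        · simp
        · simp
      · rfl

-- Per-label agreement: the merged table's lookup equals A's branch chain.
theorem label_value_eq (sunColorDict : List (String × String)) (label : String) :
    (((PySem.Dict.empty.insert "Discouraged" "rgb(150, 20, 0)").insert
        "Encouraged" "rgb(0, 200, 140)").update sunColorDict).getD label "" =
      (if (PySem.Dict.ofList sunColorDict).contains label
        then (PySem.Dict.ofList sunColorDict).getD label ""
        else if label = "Discouraged" then "rgb(150, 20, 0)"
        else if label = "Encouraged" then "rgb(0, 200, 140)"
        else "") := by
  rw [PySem.Dict.getD_eq_get?_getD, get?_update_eq]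
  rcases h : (PySem.Dict.ofList sunColorDict).get? label with _ | v
  · have hc : (PySem.Dict.ofList sunColorDict).contains label = false := by
      rw [PySem.Dict.contains_eq_isSome_get?, h]; rfl
    rw [hc]
    simp only [PySem.Dict.get?_insert, PySem.Dict.get?_empty]
    by_cases h1 : label = "Discouraged"
    · subst h1; simp
    · by_cases h2 : label = "Encouraged"
      · subst h2; simp
      · simp [h1, h2]
  · have hc : (PySem.Dict.ofList sunColorDict).contains label = true := by
      rw [PySem.Dict.contains_eq_isSome_get?, h]; rfl
    rw [hc]
    simp [PySem.Dict.getD_eq_get?_getD, h]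

-- Writing one color at a list of nonnegative indices: the element at j becomes the color
-- exactly when j is one of the indices (and in range), otherwise stays.
theorem setMany_get (c : String) : ∀ (idxs : List Int) (r : List String) (j : Nat),
    (∀ i ∈ idxs, 0 ≤ i) →
    (idxs.foldl (fun r i => PySem.List.pySetD r i c) r)[j]? =
      if (j : Int) ∈ idxs then r[j]?.map (fun _ => c) else r[j]? := by
  intro idxs
  induction idxs with
  | nil => intro r j _; simp
  | cons i t ih =>
      intro r j hnn
      have hi : 0 ≤ i := hnn i (by simp)
      have hset : (PySem.List.pySetD r i c)[j]? =
          if (j : Int) = i then r[j]?.map (fun _ => c) else r[j]? := by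
        rw [PySem.List.pySetD_of_nonneg r c hi, List.getElem?_set]
        by_cases hij : (j : Int) = i
        · have : i.toNat = j := by omega
          simp only [this, hij]
          by_cases hlen : j < r.length
          · simp [hlen]
          · simp [hlen]
        · have : i.toNat ≠ j := by omega
          simp [this, hij]
      rw [List.foldl_cons, ih _ j (fun x hx => hnn x (by simp [hx])), hset]
      by_cases hjm : (j : Int) ∈ t
      · have hmem : (j : Int) ∈ (i :: t) := by simp [hjm]
        rw [if_pos hjm, if_pos hmem]
        by_cases hij : (j : Int) = i
        · rw [if_pos hij]; cases r[j]? <;> rfl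
        · rw [if_neg hij]
      · by_cases hij : (j : Int) = i
        · have hmem : (j : Int) ∈ (i :: t) := by simp [hij]
          rw [if_neg hjm, if_pos hij, if_pos hmem]
        · have hmem : (j : Int) ∉ (i :: t) := by simp [hjm, hij]
          rw [if_neg hjm, if_neg hij, if_neg hmem]

-- Scatter over a list of (key, color) items with pairwise-distinct keys and disjoint position
-- buckets: the element at j becomes the color of the unique item whose bucket contains j.
theorem scatter_get (pos : String → List Int)
    (hnn : ∀ k, ∀ i ∈ pos k, 0 ≤ i)
    (hdisj : ∀ k k' (x : Int), x ∈ pos k → x ∈ pos k' → k = k') :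
    ∀ (its : List (String × String)), (its.map (·.1)).Nodup →
    ∀ (r : List String) (j : Nat),
    (its.foldl (fun res kc => (pos kc.1).foldl (fun r i => PySem.List.pySetD r i kc.2) res) r)[j]? =
      match its.find? (fun kc => decide ((j : Int) ∈ pos kc.1)) with
      | some kc => r[j]?.map (fun _ => kc.2)
      | none => r[j]? := by
  intro its
  induction its with
  | nil => intro _ r j; simp
  | cons kc t ih =>
      intro hnd r j
      have hndt : (t.map (·.1)).Nodup := (List.nodup_cons.mp hnd).2
      have hknot : kc.1 ∉ t.map (·.1) := (List.nodup_cons.mp hnd).1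
      rw [List.foldl_cons, ih hndt]
      by_cases hmem : (j : Int) ∈ pos kc.1
      · -- no later item's bucket can contain j (disjointness + nodup keys)
        have hnone : t.find? (fun kc' => decide ((j : Int) ∈ pos kc'.1)) = none := by
          rw [List.find?_eq_none]
          intro x hx
          simp only [decide_eq_true_eq]
          intro hx'
          exact hknot (by
            have : x.1 = kc.1 := hdisj x.1 kc.1 j hx' hmem
            rw [← this]; exact List.mem_map_of_mem hx)
        rw [hnone]
        have : (kc :: t).find? (fun kc' => decide ((j : Int) ∈ pos kc'.1)) = some kc := by
          simp [hmem]
        rw [this, setMany_get kc.2 (pos kc.1) r j (hnn kc.1), if_pos hmem]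
      · have : (kc :: t).find? (fun kc' => decide ((j : Int) ∈ pos kc'.1)) =
            t.find? (fun kc' => decide ((j : Int) ∈ pos kc'.1)) := by
          simp [hmem]
        rw [this, setMany_get kc.2 (pos kc.1) r j (hnn kc.1), if_neg hmem]

-- The positions dict: its bucket for k is the filtered/mapped enumeration.
theorem positions_getD (labels : List String) (k : String) :
    ((PySem.List.enumerate labels).foldl
        (fun d p => d.modify p.2 [] (· ++ [p.1 + 1])) PySem.Dict.empty).getD k [] =
      (((PySem.List.enumerate labels).filter (fun p => p.2 == k)).map (fun p => p.1 + 1)) := by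
  have hfold : (PySem.List.enumerate labels).foldl
        (fun d p => d.modify p.2 [] (· ++ [p.1 + 1])) PySem.Dict.empty =
      ((PySem.List.enumerate labels).map (fun p => (p.2, p.1 + 1))).foldl
        (fun d q => d.modify q.1 [] (· ++ [q.2])) PySem.Dict.empty := by
    rw [List.foldl_map]
  rw [hfold, PySem.Dict.getD_foldl_modify_append, PySem.Dict.getD_empty, List.filter_map,
    List.map_map]
  simp [Function.comp_def]

-- Membership in a bucket ⟺ some position t of labels carries k, and the index is s + t + 1.
theorem mem_bucket (k : String) (x : Int) : ∀ (labels : List String) (s : Int),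
    (x ∈ ((PySem.List.enumerate labels s).filter (fun p => p.2 == k)).map (fun p => p.1 + 1)) ↔
      ∃ t : Nat, t < labels.length ∧ labels[t]? = some k ∧ x = s + t + 1 := by
  intro labels
  induction labels with
  | nil => intro s; simp [PySem.List.enumerate]
  | cons l ls ih =>
      intro s
      rw [PySem.List.enumerate_cons]
      by_cases hl : l = k
      · subst hl
        rw [List.filter_cons_of_pos (by simp), List.map_cons, List.mem_cons, ih]
        constructor
        · rintro (h | ⟨t, ht, hk, hx⟩)
          · exact ⟨0, by simp, by simp, by omega⟩
          · exact ⟨t + 1, by simpa using ht, by simpa using hk, by push_cast; omega⟩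
        · rintro ⟨t, ht, hk, hx⟩
          cases t with
          | zero => exact Or.inl (by omega)
          | succ t' => exact Or.inr ⟨t', by simpa using ht, by simpa using hk, by push_cast at hx ⊢; omega⟩
      · rw [List.filter_cons_of_neg (by simp [hl]), ih]
        constructor
        · rintro ⟨t, ht, hk, hx⟩
          exact ⟨t + 1, by simpa using ht, by simpa using hk, by push_cast; omega⟩
        · rintro ⟨t, ht, hk, hx⟩
          cases t with
          | zero =>
              rw [List.getElem?_cons_zero] at hk
              exact absurd (Option.some.inj hk) hl
          | succ t' => exact ⟨t', by simpa using ht, by simpa using hk, by push_cast at hx ⊢; omega⟩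

-- A's fold is the leading "" followed by the per-label classification.
theorem portA_eq_map (sunColorDict : List (String × String)) (justNameLabels : List String) :
    colorsListSunburst sunColorDict justNameLabels =
      [""] ++ justNameLabels.map (fun label =>
        if (PySem.Dict.ofList sunColorDict).contains label
          then (PySem.Dict.ofList sunColorDict).getD label ""
          else if label = "Discouraged" then "rgb(150, 20, 0)"
          else if label = "Encouraged" then "rgb(0, 200, 140)"
          else "") := by
  unfold colorsListSunburst
  rw [show (justNameLabels.foldl
        (fun myColorList label =>
          if (PySem.Dict.ofList sunColorDict).contains label then
            myColorList ++ [(PySem.Dict.ofList sunColorDict).getD label ""]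
          else if label = "Discouraged" then myColorList ++ ["rgb(150, 20, 0)"]
          else if label = "Encouraged" then myColorList ++ ["rgb(0, 200, 140)"]
          else myColorList ++ [""]) [""]) =
      justNameLabels.foldl
        (fun acc label => acc ++
          [if (PySem.Dict.ofList sunColorDict).contains label
            then (PySem.Dict.ofList sunColorDict).getD label ""
            else if label = "Discouraged" then "rgb(150, 20, 0)"
            else if label = "Encouraged" then "rgb(0, 200, 140)"
            else ""]) [""] from by
        congr 1; funext acc label; split_ifs <;> rfl]
  exact PySem.List.foldl_append_singleton_eq_map _ _ _

-- ===== VERDICT (by name: the statement is the Claim_ definition above) =====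
theorem colorsListSunburst_spec : Claim_equal_colorsListSunburst := by
  intro sunColorDict justNameLabels _
  unfold Spec_colorsListSunburst
  set n := justNameLabels.length with hn
  set table := ((PySem.Dict.empty.insert "Discouraged" "rgb(150, 20, 0)").insert
      "Encouraged" "rgb(0, 200, 140)").update sunColorDict with htable
  set pos : String → List Int := fun k =>
    (((PySem.List.enumerate justNameLabels).filter (fun p => p.2 == k)).map (fun p => p.1 + 1))
    with hpos
  have hmemb : ∀ k (x : Int), x ∈ pos k ↔
      ∃ t : Nat, t < n ∧ justNameLabels[t]? = some k ∧ x = t + 1 := by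
    intro k x
    refine (mem_bucket k x justNameLabels 0).trans ?_
    constructor
    · rintro ⟨t, h1, h2, h3⟩; exact ⟨t, h1, h2, by omega⟩
    · rintro ⟨t, h1, h2, h3⟩; exact ⟨t, h1, h2, by omega⟩
  have hnn : ∀ k, ∀ i ∈ pos k, 0 ≤ i := by
    intro k i hi
    obtain ⟨t, _, _, h3⟩ := (hmemb k i).mp hi
    omega
  have hdisj : ∀ k k' (x : Int), x ∈ pos k → x ∈ pos k' → k = k' := by
    intro k k' x hk hk'
    obtain ⟨t, _, h2, h3⟩ := (hmemb k x).mp hk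
    obtain ⟨t', _, h2', h3'⟩ := (hmemb k' x).mp hk'
    have : t = t' := by omega
    subst this
    rw [h2] at h2'
    exact Option.some.inj h2'
  have hkeysnd : table.keys.Nodup := PySem.Dict.nodup_keys_update _ _ (by
    apply PySem.Dict.nodup_keys_insert
    apply PySem.Dict.nodup_keys_insert
    exact PySem.Dict.nodup_keys_empty)
  have hnd : (table.items.map (·.1)).Nodup := by
    simpa [PySem.Dict.keys] using hkeysnd
  -- B's scatter result, elementwise
  have hB : ∀ j : Nat, (colorsListSunburst_alt sunColorDict justNameLabels)[j]? =
      match table.items.find? (fun kc => decide ((j : Int) ∈ pos kc.1)) with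
      | some kc => (List.replicate (n + 1) "")[j]?.map (fun _ => kc.2)
      | none => (List.replicate (n + 1) "")[j]? := by
    intro j
    have hfun : (fun (res : List String) (kc : String × String) =>
        ((((PySem.List.enumerate justNameLabels).foldl
            (fun d p => d.modify p.2 [] (· ++ [p.1 + 1])) PySem.Dict.empty).getD kc.1 []).foldl
          (fun r i => PySem.List.pySetD r i kc.2) res)) =
        (fun res kc => (pos kc.1).foldl (fun r i => PySem.List.pySetD r i kc.2) res) := by
      funext res kc
      rw [positions_getD]
    show ((table.items.foldl _ (List.replicate (n + 1) "")))[j]? = _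
    rw [show (fun (res : List String) (kc : String × String) =>
        ((((PySem.List.enumerate justNameLabels).foldl
            (fun d p => d.modify p.2 [] (· ++ [p.1 + 1])) PySem.Dict.empty).getD kc.1 []).foldl
          (fun r i => PySem.List.pySetD r i kc.2) res)) =
        (fun res kc => (pos kc.1).foldl (fun r i => PySem.List.pySetD r i kc.2) res) from hfun]
    exact scatter_get pos hnn hdisj table.items hnd (List.replicate (n + 1) "") j
  rw [portA_eq_map]
  apply List.ext_getElem?
  intro j
  rw [hB j]
  set f : String → String := fun label =>
    if (PySem.Dict.ofList sunColorDict).contains label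
      then (PySem.Dict.ofList sunColorDict).getD label ""
      else if label = "Discouraged" then "rgb(150, 20, 0)"
      else if label = "Encouraged" then "rgb(0, 200, 140)"
      else "" with hf
  have hfl : ∀ l, f l = table.getD l "" := fun l => (label_value_eq sunColorDict l).symm
  rcases j with _ | t
  · -- j = 0: no bucket contains 0, both sides are ""
    have hfnone : table.items.find? (fun kc => decide (((0:Nat) : Int) ∈ pos kc.1)) = none := by
      rw [List.find?_eq_none]
      intro kc _
      simp only [decide_eq_true_eq]
      intro hmem
      obtain ⟨t, _, _, h3⟩ := (hmemb kc.1 _).mp hmem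
      omega
    rw [hfnone]
    simp
  · by_cases ht : t < n
    · -- j = t+1 in range: label l at t
      obtain ⟨l, hl⟩ : ∃ l, justNameLabels[t]? = some l :=
        ⟨justNameLabels[t]'(by omega), List.getElem?_eq_getElem (by omega)⟩
      have hiff : ∀ k, (((t + 1 : Nat) : Int) ∈ pos k) ↔ k = l := by
        intro k
        rw [hmemb]
        constructor
        · rintro ⟨t', _, h2, h3⟩
          have : t' = t := by omega
          subst this
          rw [hl] at h2
          exact (Option.some.inj h2).symm
        · rintro rfl
          exact ⟨t, ht, hl, by push_cast; omega⟩
      have hrep : (List.replicate (n + 1) "")[t + 1]? = some "" := by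
        rw [List.getElem?_replicate]
        simp [Nat.succ_lt_succ ht]
      have hA : ([""] ++ justNameLabels.map f)[t + 1]? = some (f l) := by
        rw [List.singleton_append, List.getElem?_cons_succ, List.getElem?_map, hl]
        rfl
      rcases hget : table.get? l with _ | v
      · -- l not in table: find? none, both ""
        have hfnone : table.items.find? (fun kc => decide (((t + 1 : Nat) : Int) ∈ pos kc.1)) = none := by
          rw [List.find?_eq_none]
          rintro ⟨a, b⟩ hkc
          simp only [decide_eq_true_eq]
          intro hmem
          have h1 : a = l := (hiff a).mp hmem
          have := PySem.Dict.get?_of_mem_items table hkc hkeysnd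
          rw [h1, hget] at this
          simp at this
        rw [hfnone, hA, hrep]
        have : f l = "" := by
          rw [hfl, PySem.Dict.getD_eq_get?_getD, hget]
          rfl
        rw [this]
      · -- l in table with value v: find? yields (l, v)
        rcases hfind : table.items.find? (fun kc => decide (((t + 1 : Nat) : Int) ∈ pos kc.1)) with _ | kc
        · exfalso
          have hmem : (l, v) ∈ table.items := PySem.Dict.mem_items_of_get?_eq_some table hget
          have := List.find?_eq_none.mp hfind (l, v) hmem
          simp only [decide_eq_true_eq] at this
          exact this ((hiff l).mpr rfl)
        · obtain ⟨a, b⟩ := kc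
          have hpred : ((t + 1 : Nat) : Int) ∈ pos a := by
            have := List.find?_some hfind
            simpa using this
          have hk1 : a = l := (hiff a).mp hpred
          have hkmem : (a, b) ∈ table.items := List.mem_of_find?_eq_some hfind
          have hkv : table.get? a = some b :=
            PySem.Dict.get?_of_mem_items table hkmem hkeysnd
          rw [hk1, hget] at hkv
          have hv2 : b = v := (Option.some.inj hkv).symm
          rw [hA, hrep]
          simp only [Option.map_some]
          have : f l = b := by
            rw [hfl, PySem.Dict.getD_eq_get?_getD, hget, hv2]
            rfl
          rw [this, hfind]
    · -- j = t+1 out of range: both none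
      have hfnone : table.items.find? (fun kc => decide (((t + 1 : Nat) : Int) ∈ pos kc.1)) = none := by
        rw [List.find?_eq_none]
        intro kc _
        simp only [decide_eq_true_eq]
        intro hmem
        obtain ⟨t', ht', _, h3⟩ := (hmemb kc.1 _).mp hmem
        omega
      rw [hfnone]
      have h1 : ([""] ++ justNameLabels.map f)[t + 1]? = none := by
        apply List.getElem?_eq_none
        simp
        omega
      have h2 : (List.replicate (n + 1) "")[t + 1]? = none := by
        apply List.getElem?_eq_none
        simp
        omega
      rw [h1, h2]
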